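-- pv_equiv track=rewrite | github.com/leemingloon/ocr-agentic-rag | rag_system/finqa_program_executor.py | _split_steps
-- ===== SOURCE A (Python) =====
-- def _split_steps(program: str) -> list[str]:
--     """Split program into steps by top-level comma or newline. Preserves paren depth."""
--     steps_str = []
--     depth = 0
--     start = 0
--     for i, c in enumerate(program):
--         if c == "(":
--             depth += 1
--         elif c == ")":
--             depth -= 1
--         elif depth == 0 and (c == "," or c == "\n"):
--             part = program[start:i].strip()
--             if part:
--                 steps_str.append(part)
--             start = i + 1
--     part = program[start:].strip()
--     if part:
--         steps_str.append(part)
--     return steps_str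
-- ===== SOURCE B (Python) =====
-- def _split_steps(program: str) -> list[str]:
--     """Recursive head/rest decomposition: cut off the text before the first
--     top-level comma/newline and recurse on the remainder of the string."""
--     depth = 0
--     for i, c in enumerate(program):
--         if c == "(":
--             depth += 1
--         elif c == ")":
--             depth -= 1
--         elif depth == 0 and (c == "," or c == "\n"):
--             head = program[:i].strip()
--             rest = _split_steps(program[i + 1:])
--             return ([head] + rest) if head else rest
--     last = program.strip()
--     return [last] if last else []
-- ===== Notes on version B (the rewrite author's own statement) =====
-- stated objective: alternative
-- what changed: B is a recursive head/rest decomposition: it finds only the FIRST top-level delimiter, emits the stripped head, and recurses on the remaining suffix (a fresh subproblem, valid because depth is 0 at every cut), instead of A's single iterative scan over the whole string with a steps/depth/start accumulator.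
import Mathlib
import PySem

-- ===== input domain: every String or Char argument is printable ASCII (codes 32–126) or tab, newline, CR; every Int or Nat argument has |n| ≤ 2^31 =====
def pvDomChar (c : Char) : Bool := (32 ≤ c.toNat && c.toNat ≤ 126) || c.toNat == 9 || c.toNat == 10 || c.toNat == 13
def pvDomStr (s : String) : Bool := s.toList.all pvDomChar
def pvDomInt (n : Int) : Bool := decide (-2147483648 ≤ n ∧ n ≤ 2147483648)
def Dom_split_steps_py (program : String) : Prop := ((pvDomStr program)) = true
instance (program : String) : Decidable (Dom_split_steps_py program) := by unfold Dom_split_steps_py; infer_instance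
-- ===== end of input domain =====

-- B replaces A's iterative accumulator scan by a recursive head/rest decomposition
-- (cut at the first top-level delimiter, recurse on the suffix); equal cost, return values proved equal.

-- ===== PORT A =====
-- one iteration of A's loop body: state (steps, depth, start)
def splitStepA (cs : List Char) (st : List String × Int × Int) (ic : Int × Char) :
    List String × Int × Int :=
  let (steps, depth, start) := st
  let (i, c) := ic
  if c = '(' then (steps, depth + 1, start)
  else if c = ')' then (steps, depth - 1, start)
  else if depth = 0 ∧ (c = ',' ∨ c = '\n') then
    let part := PySem.Chars.strip (PySem.List.slice cs (some start) (some i))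
    ((if part.isEmpty = false then steps ++ [String.ofList part] else steps), depth, i + 1)
  else (steps, depth, start)

def split_steps_py (program : String) : List String :=
  let cs := program.toList
  let fin := (PySem.List.enumerate cs 0).foldl (splitStepA cs) ([], 0, 0)
  let part := PySem.Chars.strip (PySem.List.slice cs (some fin.2.2) none)
  if part.isEmpty = false then fin.1 ++ [String.ofList part] else fin.1

-- ===== PORT B =====
-- Source B's recursion over the current suffix; `acc` holds the chars already seen in the
-- current call (reversed), so `acc.reverse` is program[:i] of the current suffix string
def altGo (acc : List Char) (depth : Int) : List Char → List String
  | [] =>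
      let last := PySem.Chars.strip acc.reverse
      if last.isEmpty then [] else [String.ofList last]
  | c :: rest =>
      if c = '(' then altGo (c :: acc) (depth + 1) rest
      else if c = ')' then altGo (c :: acc) (depth - 1) rest
      else if depth = 0 ∧ (c = ',' ∨ c = '\n') then
        let head := PySem.Chars.strip acc.reverse
        let steps := altGo [] 0 rest
        if head.isEmpty then steps else String.ofList head :: steps
      else altGo (c :: acc) depth rest

def split_steps_py_alt (program : String) : List String :=
  altGo [] 0 program.toList

-- ===== PRECONDITION & SPEC =====
def Spec_split_steps_py (program : String) (out : List String) : Prop := out = split_steps_py_alt program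
instance (program : String) (out : List String) : Decidable (Spec_split_steps_py program out) := by unfold Spec_split_steps_py; infer_instance

-- ===== CLAIM (what is proved, stated in full; the proofs are below) =====
def Claim_equal_split_steps_py : Prop := ∀ (program : String), Dom_split_steps_py program → Spec_split_steps_py program (split_steps_py program)

-- ===== LEMMAS AND PROOFS =====

-- A's epilogue (strip-and-maybe-append of the tail slice), as a function of the final state
def finishA (cs : List Char) (st : List String × Int × Int) : List String :=
  let part := PySem.Chars.strip (PySem.List.slice cs (some st.2.2) none)
  if part.isEmpty = false then st.1 ++ [String.ofList part] else st.1

lemma gen (cs : List Char) : ∀ (l acc : List Char) (steps : List String) (depth : Int)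
    (s n : Nat), acc.reverse ++ l = cs.drop s → cs.drop n = l → s ≤ n →
    finishA cs ((PySem.List.enumerate l (n : Int)).foldl (splitStepA cs) (steps, depth, (s : Int)))
      = steps ++ altGo acc depth l := by
  intro l
  induction l with
  | nil =>
      intro acc steps depth s n h1 h2 hsn
      simp only [List.append_nil] at h1
      simp [PySem.List.enumerate, finishA, altGo, PySem.List.slice_from_natCast, ← h1]
      split <;> simp_all
  | cons c l' ih =>
      intro acc steps depth s n h1 h2 hsn
      have hdrop : cs.drop (n + 1) = l' := by
        have := congrArg (List.drop 1) h2
        simpa [List.drop_drop, Nat.add_comm] using this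
      rw [PySem.List.enumerate_cons, List.foldl_cons]
      by_cases hc1 : c = '('
      · rw [show splitStepA cs (steps, depth, (s : Int)) ((n : Int), c)
              = (steps, depth + 1, (s : Int)) by simp [splitStepA, hc1]]
        rw [show ((n : Int) + 1) = ((n + 1 : Nat) : Int) by push_cast; ring]
        rw [ih (c :: acc) steps (depth + 1) s (n + 1) (by simpa using h1) hdrop (by omega)]
        simp [altGo, hc1]
      · by_cases hc2 : c = ')'
        · rw [show splitStepA cs (steps, depth, (s : Int)) ((n : Int), c)
                = (steps, depth - 1, (s : Int)) by simp [splitStepA, hc2]]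
          rw [show ((n : Int) + 1) = ((n + 1 : Nat) : Int) by push_cast; ring]
          rw [ih (c :: acc) steps (depth - 1) s (n + 1) (by simpa using h1) hdrop (by omega)]
          simp [altGo, hc2]
        · by_cases hc3 : depth = 0 ∧ (c = ',' ∨ c = '\n')
          · -- top-level delimiter: A emits and resets start; B emits head and recurses
            have hn : n < cs.length := by
              by_contra h
              rw [List.drop_eq_nil_of_le (by omega)] at h2
              simp at h2
            have hlen : acc.length = n - s := by
              have := congrArg List.length h1
              have h2l := congrArg List.length h2
              simp [List.length_drop] at this h2l
              omega
            have hslice : PySem.List.slice cs (some (s : Int)) (some (n : Int))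
                = acc.reverse := by
              rw [PySem.List.slice_natCast, ← h1]
              exact List.take_left' (by simpa using hlen)
            obtain ⟨hd0, hdel⟩ := hc3
            subst hd0
            rw [show splitStepA cs (steps, 0, (s : Int)) ((n : Int), c)
                  = ((if (PySem.Chars.strip (PySem.List.slice cs (some (s:Int)) (some (n:Int)))).isEmpty = false
                      then steps ++ [String.ofList (PySem.Chars.strip (PySem.List.slice cs (some (s:Int)) (some (n:Int))))]
                      else steps), 0, (n : Int) + 1) by
                simp [splitStepA, hc1, hc2, hdel]]
            rw [hslice]
            rw [show ((n : Int) + 1) = ((n + 1 : Nat) : Int) by push_cast; ring]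
            rw [ih [] _ 0 (n + 1) (n + 1) (by simpa using hdrop.symm) hdrop (le_refl _)]
            have haltB : altGo acc 0 (c :: l') =
                (if (PySem.Chars.strip acc.reverse).isEmpty then altGo [] 0 l'
                 else String.ofList (PySem.Chars.strip acc.reverse) :: altGo [] 0 l') := by
              simp [altGo, hc1, hc2, hdel]
            rw [haltB]
            by_cases he : (PySem.Chars.strip acc.reverse).isEmpty <;> simp [he]
          · rw [show splitStepA cs (steps, depth, (s : Int)) ((n : Int), c)
                  = (steps, depth, (s : Int)) by simp [splitStepA, hc1, hc2, hc3]]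
            rw [show ((n : Int) + 1) = ((n + 1 : Nat) : Int) by push_cast; ring]
            rw [ih (c :: acc) steps depth s (n + 1) (by simpa using h1) hdrop (by omega)]
            simp [altGo, hc1, hc2, hc3]

-- ===== VERDICT (by name: the statement is the Claim_ definition above) =====
theorem split_steps_py_spec : Claim_equal_split_steps_py := by
  intro program _
  unfold Spec_split_steps_py split_steps_py split_steps_py_alt
  have := gen program.toList program.toList [] [] 0 0 0 (by simp) (by simp) (le_refl _)
  simpa [finishA] using this
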